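-- pv_equiv track=rewrite | github.com/lal4lal/TUBES-TBA | token_recognizer.py | check_objek
-- ===== SOURCE A (Python) =====
-- def check_objek(input_string):
--     state = objek_initial_states
--     for char in input_string:
--         if (state, char) in objek_transitions:
--             state = objek_transitions[(state, char)]
--         else:
--             return False
--     return state in objek_accept_states
--
-- objek_transitions = {
--     # p, e, m, f, a, k, t, o, r, n, b, g, i, l, h, u
--     ('q0', 'p'): 'q1',
--     ('q1', 'e'): 'q2',
--     ('q2', 'm'): 'q21', ('q2', 'r'): 'q3', ('q2', 'n'): 'q15',
--     ('q3', 'k'): 'q4', ('q3', 't'): 'q10',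
--     ('q4', 'a'): 'q5',
--     ('q5', 'l'): 'q6',
--     ('q6', 'i'): 'q7',
--     ('q7', 'a'): 'q8',
--     ('q8', 'n'): 'q9',
--     ('q10', 'a'): 'q11',
--     ('q11', 'm'): 'q12',
--     ('q12', 'b'): 'q13',
--     ('q13', 'a'): 'q14',
--     ('q14', 'h'): 'q7',
--     ('q15', 'g'): 'q16',
--     ('q16', 'u'): 'q17',
--     ('q17', 'r'): 'q18',
--     ('q18', 'a'): 'q19',
--     ('q19', 'n'): 'q20',
--     ('q20', 'g'): 'q7',
--     ('q21', 'f'): 'q24', ('q21', 'b'): 'q22',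
--     ('q22', 'a'): 'q23',
--     ('q23', 'g'): 'q6',
--     ('q24', 'a'): 'q25',
--     ('q25', 'k'): 'q26',
--     ('q26', 't'): 'q27',
--     ('q27', 'o'): 'q28',
--     ('q28', 'r'): 'q7',
-- }
--
-- objek_accept_states = {'q9'}
--
-- objek_initial_states = 'q0'
-- ===== SOURCE B (Python) =====
-- ACCEPTED = frozenset({'perkalian', 'pertambahan', 'pengurangan', 'pembagian', 'pemfaktoran'})
--
-- def check_objek(input_string):
--     return input_string in ACCEPTED
-- ===== Notes on version B (the rewrite author's own statement) =====
-- stated objective: simpler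
-- what changed: The DFA recognizes exactly five fixed words, so B replaces the per-character state-machine traversal with a single whole-string membership test in a frozenset of those five words.
import Mathlib
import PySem

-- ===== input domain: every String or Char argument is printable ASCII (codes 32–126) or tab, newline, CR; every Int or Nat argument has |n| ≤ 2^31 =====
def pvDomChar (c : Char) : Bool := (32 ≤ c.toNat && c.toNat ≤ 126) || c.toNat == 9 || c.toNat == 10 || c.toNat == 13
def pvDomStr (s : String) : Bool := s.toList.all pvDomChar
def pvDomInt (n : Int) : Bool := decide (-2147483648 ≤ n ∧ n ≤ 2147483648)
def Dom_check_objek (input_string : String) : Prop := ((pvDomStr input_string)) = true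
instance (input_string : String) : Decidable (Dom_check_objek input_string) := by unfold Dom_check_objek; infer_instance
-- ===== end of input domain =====

-- B replaces A's per-character DFA traversal by one membership test in the set of the five words the DFA accepts (objective: simpler).

-- ===== PORT A =====
def objek_transitions : PySem.Dict (String × Char) String := PySem.Dict.ofList [
  (("q0", 'p'), "q1"),
  (("q1", 'e'), "q2"),
  (("q2", 'm'), "q21"), (("q2", 'r'), "q3"), (("q2", 'n'), "q15"),
  (("q3", 'k'), "q4"), (("q3", 't'), "q10"),
  (("q4", 'a'), "q5"),
  (("q5", 'l'), "q6"),
  (("q6", 'i'), "q7"),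
  (("q7", 'a'), "q8"),
  (("q8", 'n'), "q9"),
  (("q10", 'a'), "q11"),
  (("q11", 'm'), "q12"),
  (("q12", 'b'), "q13"),
  (("q13", 'a'), "q14"),
  (("q14", 'h'), "q7"),
  (("q15", 'g'), "q16"),
  (("q16", 'u'), "q17"),
  (("q17", 'r'), "q18"),
  (("q18", 'a'), "q19"),
  (("q19", 'n'), "q20"),
  (("q20", 'g'), "q7"),
  (("q21", 'f'), "q24"), (("q21", 'b'), "q22"),
  (("q22", 'a'), "q23"),
  (("q23", 'g'), "q6"),
  (("q24", 'a'), "q25"),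
  (("q25", 'k'), "q26"),
  (("q26", 't'), "q27"),
  (("q27", 'o'), "q28"),
  (("q28", 'r'), "q7")]

def objek_accept_states : PySem.Set String := PySem.Set.ofList ["q9"]

def objek_initial_states : String := "q0"

-- the 'for char in input_string' loop with its early 'return False'
def checkLoop : String → List Char → Bool
  | state, [] => decide (state ∈ objek_accept_states)
  | state, char :: rest =>
    match objek_transitions.get? (state, char) with
    | some s' => checkLoop s' rest
    | none => false

def check_objek (input_string : String) : Bool :=
  checkLoop objek_initial_states input_string.toList

-- ===== PORT B =====
def ACCEPTED : PySem.Set String :=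
  PySem.Set.ofList ["perkalian", "pertambahan", "pengurangan", "pembagian", "pemfaktoran"]

def check_objek_alt (input_string : String) : Bool :=
  decide (input_string ∈ ACCEPTED)

-- ===== PRECONDITION & SPEC =====
def Spec_check_objek (input_string : String) (out : Bool) : Prop := out = check_objek_alt input_string
instance (input_string : String) (out : Bool) : Decidable (Spec_check_objek input_string out) := by unfold Spec_check_objek; infer_instance

-- ===== CLAIM (what is proved, stated in full; the proofs are below) =====
def Claim_equal_check_objek : Prop := ∀ (input_string : String), Dom_check_objek input_string → Spec_check_objek input_string (check_objek input_string)

-- ===== LEMMAS AND PROOFS =====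
-- Each suff_q<i> characterises the suffix language accepted from state q<i>; proved bottom-up (the DFA is acyclic).

lemma trans_eq : objek_transitions = PySem.Dict.mk [(("q0", 'p'), "q1"), (("q1", 'e'), "q2"), (("q2", 'm'), "q21"), (("q2", 'r'), "q3"), (("q2", 'n'), "q15"), (("q3", 'k'), "q4"), (("q3", 't'), "q10"), (("q4", 'a'), "q5"), (("q5", 'l'), "q6"), (("q6", 'i'), "q7"), (("q7", 'a'), "q8"), (("q8", 'n'), "q9"), (("q10", 'a'), "q11"), (("q11", 'm'), "q12"), (("q12", 'b'), "q13"), (("q13", 'a'), "q14"), (("q14", 'h'), "q7"), (("q15", 'g'), "q16"), (("q16", 'u'), "q17"), (("q17", 'r'), "q18"), (("q18", 'a'), "q19"), (("q19", 'n'), "q20"), (("q20", 'g'), "q7"), (("q21", 'f'), "q24"), (("q21", 'b'), "q22"), (("q22", 'a'), "q23"), (("q23", 'g'), "q6"), (("q24", 'a'), "q25"), (("q25", 'k'), "q26"), (("q26", 't'), "q27"), (("q27", 'o'), "q28"), (("q28", 'r'), "q7")] := by decide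

lemma suff_q9 : ∀ cs : List Char, checkLoop "q9" cs = (decide (cs = [])) := by
  intro cs
  cases cs with
  | nil => decide
  | cons c cs =>
    have hnone : objek_transitions.get? ("q9", c) = none := by
      rw [trans_eq, PySem.Dict.get?_eq_none_iff_not_mem_keys]
      simp
    simp only [checkLoop, hnone]
    simp

lemma suff_q8 : ∀ cs : List Char, checkLoop "q8" cs = (decide (cs = ['n'])) := by
  intro cs
  cases cs with
  | nil => decide
  | cons c cs =>
    by_cases hn : c = 'n'
    · subst hn
      have hstep : checkLoop "q8" ('n' :: cs) = checkLoop "q9" cs := rfl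
      rw [hstep, suff_q9]
      simp
    · have hnone : objek_transitions.get? ("q8", c) = none := by
        rw [trans_eq, PySem.Dict.get?_eq_none_iff_not_mem_keys]
        simp [hn]
      simp only [checkLoop, hnone]
      simp [hn]

lemma suff_q7 : ∀ cs : List Char, checkLoop "q7" cs = (decide (cs = ['a', 'n'])) := by
  intro cs
  cases cs with
  | nil => decide
  | cons c cs =>
    by_cases ha : c = 'a'
    · subst ha
      have hstep : checkLoop "q7" ('a' :: cs) = checkLoop "q8" cs := rfl
      rw [hstep, suff_q8]
      simp
    · have hnone : objek_transitions.get? ("q7", c) = none := by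
        rw [trans_eq, PySem.Dict.get?_eq_none_iff_not_mem_keys]
        simp [ha]
      simp only [checkLoop, hnone]
      simp [ha]

lemma suff_q28 : ∀ cs : List Char, checkLoop "q28" cs = (decide (cs = ['r', 'a', 'n'])) := by
  intro cs
  cases cs with
  | nil => decide
  | cons c cs =>
    by_cases hr : c = 'r'
    · subst hr
      have hstep : checkLoop "q28" ('r' :: cs) = checkLoop "q7" cs := rfl
      rw [hstep, suff_q7]
      simp
    · have hnone : objek_transitions.get? ("q28", c) = none := by
        rw [trans_eq, PySem.Dict.get?_eq_none_iff_not_mem_keys]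
        simp [hr]
      simp only [checkLoop, hnone]
      simp [hr]

lemma suff_q27 : ∀ cs : List Char, checkLoop "q27" cs = (decide (cs = ['o', 'r', 'a', 'n'])) := by
  intro cs
  cases cs with
  | nil => decide
  | cons c cs =>
    by_cases ho : c = 'o'
    · subst ho
      have hstep : checkLoop "q27" ('o' :: cs) = checkLoop "q28" cs := rfl
      rw [hstep, suff_q28]
      simp
    · have hnone : objek_transitions.get? ("q27", c) = none := by
        rw [trans_eq, PySem.Dict.get?_eq_none_iff_not_mem_keys]
        simp [ho]
      simp only [checkLoop, hnone]
      simp [ho]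

lemma suff_q26 : ∀ cs : List Char, checkLoop "q26" cs = (decide (cs = ['t', 'o', 'r', 'a', 'n'])) := by
  intro cs
  cases cs with
  | nil => decide
  | cons c cs =>
    by_cases ht : c = 't'
    · subst ht
      have hstep : checkLoop "q26" ('t' :: cs) = checkLoop "q27" cs := rfl
      rw [hstep, suff_q27]
      simp
    · have hnone : objek_transitions.get? ("q26", c) = none := by
        rw [trans_eq, PySem.Dict.get?_eq_none_iff_not_mem_keys]
        simp [ht]
      simp only [checkLoop, hnone]
      simp [ht]

lemma suff_q25 : ∀ cs : List Char, checkLoop "q25" cs = (decide (cs = ['k', 't', 'o', 'r', 'a', 'n'])) := by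
  intro cs
  cases cs with
  | nil => decide
  | cons c cs =>
    by_cases hk : c = 'k'
    · subst hk
      have hstep : checkLoop "q25" ('k' :: cs) = checkLoop "q26" cs := rfl
      rw [hstep, suff_q26]
      simp
    · have hnone : objek_transitions.get? ("q25", c) = none := by
        rw [trans_eq, PySem.Dict.get?_eq_none_iff_not_mem_keys]
        simp [hk]
      simp only [checkLoop, hnone]
      simp [hk]

lemma suff_q24 : ∀ cs : List Char, checkLoop "q24" cs = (decide (cs = ['a', 'k', 't', 'o', 'r', 'a', 'n'])) := by
  intro cs
  cases cs with
  | nil => decide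
  | cons c cs =>
    by_cases ha : c = 'a'
    · subst ha
      have hstep : checkLoop "q24" ('a' :: cs) = checkLoop "q25" cs := rfl
      rw [hstep, suff_q25]
      simp
    · have hnone : objek_transitions.get? ("q24", c) = none := by
        rw [trans_eq, PySem.Dict.get?_eq_none_iff_not_mem_keys]
        simp [ha]
      simp only [checkLoop, hnone]
      simp [ha]

lemma suff_q6 : ∀ cs : List Char, checkLoop "q6" cs = (decide (cs = ['i', 'a', 'n'])) := by
  intro cs
  cases cs with
  | nil => decide
  | cons c cs =>
    by_cases hi : c = 'i'
    · subst hi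
      have hstep : checkLoop "q6" ('i' :: cs) = checkLoop "q7" cs := rfl
      rw [hstep, suff_q7]
      simp
    · have hnone : objek_transitions.get? ("q6", c) = none := by
        rw [trans_eq, PySem.Dict.get?_eq_none_iff_not_mem_keys]
        simp [hi]
      simp only [checkLoop, hnone]
      simp [hi]

lemma suff_q23 : ∀ cs : List Char, checkLoop "q23" cs = (decide (cs = ['g', 'i', 'a', 'n'])) := by
  intro cs
  cases cs with
  | nil => decide
  | cons c cs =>
    by_cases hg : c = 'g'
    · subst hg
      have hstep : checkLoop "q23" ('g' :: cs) = checkLoop "q6" cs := rfl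
      rw [hstep, suff_q6]
      simp
    · have hnone : objek_transitions.get? ("q23", c) = none := by
        rw [trans_eq, PySem.Dict.get?_eq_none_iff_not_mem_keys]
        simp [hg]
      simp only [checkLoop, hnone]
      simp [hg]

lemma suff_q22 : ∀ cs : List Char, checkLoop "q22" cs = (decide (cs = ['a', 'g', 'i', 'a', 'n'])) := by
  intro cs
  cases cs with
  | nil => decide
  | cons c cs =>
    by_cases ha : c = 'a'
    · subst ha
      have hstep : checkLoop "q22" ('a' :: cs) = checkLoop "q23" cs := rfl
      rw [hstep, suff_q23]
      simp
    · have hnone : objek_transitions.get? ("q22", c) = none := by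
        rw [trans_eq, PySem.Dict.get?_eq_none_iff_not_mem_keys]
        simp [ha]
      simp only [checkLoop, hnone]
      simp [ha]

lemma suff_q21 : ∀ cs : List Char, checkLoop "q21" cs = (decide (cs = ['f', 'a', 'k', 't', 'o', 'r', 'a', 'n']) || decide (cs = ['b', 'a', 'g', 'i', 'a', 'n'])) := by
  intro cs
  cases cs with
  | nil => decide
  | cons c cs =>
    by_cases hf : c = 'f'
    · subst hf
      have hstep : checkLoop "q21" ('f' :: cs) = checkLoop "q24" cs := rfl
      rw [hstep, suff_q24]
      simp
    by_cases hb : c = 'b'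
    · subst hb
      have hstep : checkLoop "q21" ('b' :: cs) = checkLoop "q22" cs := rfl
      rw [hstep, suff_q22]
      simp
    · have hnone : objek_transitions.get? ("q21", c) = none := by
        rw [trans_eq, PySem.Dict.get?_eq_none_iff_not_mem_keys]
        simp [hf, hb]
      simp only [checkLoop, hnone]
      simp [hf, hb]

lemma suff_q5 : ∀ cs : List Char, checkLoop "q5" cs = (decide (cs = ['l', 'i', 'a', 'n'])) := by
  intro cs
  cases cs with
  | nil => decide
  | cons c cs =>
    by_cases hl : c = 'l'
    · subst hl
      have hstep : checkLoop "q5" ('l' :: cs) = checkLoop "q6" cs := rfl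
      rw [hstep, suff_q6]
      simp
    · have hnone : objek_transitions.get? ("q5", c) = none := by
        rw [trans_eq, PySem.Dict.get?_eq_none_iff_not_mem_keys]
        simp [hl]
      simp only [checkLoop, hnone]
      simp [hl]

lemma suff_q4 : ∀ cs : List Char, checkLoop "q4" cs = (decide (cs = ['a', 'l', 'i', 'a', 'n'])) := by
  intro cs
  cases cs with
  | nil => decide
  | cons c cs =>
    by_cases ha : c = 'a'
    · subst ha
      have hstep : checkLoop "q4" ('a' :: cs) = checkLoop "q5" cs := rfl
      rw [hstep, suff_q5]
      simp
    · have hnone : objek_transitions.get? ("q4", c) = none := by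
        rw [trans_eq, PySem.Dict.get?_eq_none_iff_not_mem_keys]
        simp [ha]
      simp only [checkLoop, hnone]
      simp [ha]

lemma suff_q14 : ∀ cs : List Char, checkLoop "q14" cs = (decide (cs = ['h', 'a', 'n'])) := by
  intro cs
  cases cs with
  | nil => decide
  | cons c cs =>
    by_cases hh : c = 'h'
    · subst hh
      have hstep : checkLoop "q14" ('h' :: cs) = checkLoop "q7" cs := rfl
      rw [hstep, suff_q7]
      simp
    · have hnone : objek_transitions.get? ("q14", c) = none := by
        rw [trans_eq, PySem.Dict.get?_eq_none_iff_not_mem_keys]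
        simp [hh]
      simp only [checkLoop, hnone]
      simp [hh]

lemma suff_q13 : ∀ cs : List Char, checkLoop "q13" cs = (decide (cs = ['a', 'h', 'a', 'n'])) := by
  intro cs
  cases cs with
  | nil => decide
  | cons c cs =>
    by_cases ha : c = 'a'
    · subst ha
      have hstep : checkLoop "q13" ('a' :: cs) = checkLoop "q14" cs := rfl
      rw [hstep, suff_q14]
      simp
    · have hnone : objek_transitions.get? ("q13", c) = none := by
        rw [trans_eq, PySem.Dict.get?_eq_none_iff_not_mem_keys]
        simp [ha]
      simp only [checkLoop, hnone]
      simp [ha]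

lemma suff_q12 : ∀ cs : List Char, checkLoop "q12" cs = (decide (cs = ['b', 'a', 'h', 'a', 'n'])) := by
  intro cs
  cases cs with
  | nil => decide
  | cons c cs =>
    by_cases hb : c = 'b'
    · subst hb
      have hstep : checkLoop "q12" ('b' :: cs) = checkLoop "q13" cs := rfl
      rw [hstep, suff_q13]
      simp
    · have hnone : objek_transitions.get? ("q12", c) = none := by
        rw [trans_eq, PySem.Dict.get?_eq_none_iff_not_mem_keys]
        simp [hb]
      simp only [checkLoop, hnone]
      simp [hb]

lemma suff_q11 : ∀ cs : List Char, checkLoop "q11" cs = (decide (cs = ['m', 'b', 'a', 'h', 'a', 'n'])) := by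
  intro cs
  cases cs with
  | nil => decide
  | cons c cs =>
    by_cases hm : c = 'm'
    · subst hm
      have hstep : checkLoop "q11" ('m' :: cs) = checkLoop "q12" cs := rfl
      rw [hstep, suff_q12]
      simp
    · have hnone : objek_transitions.get? ("q11", c) = none := by
        rw [trans_eq, PySem.Dict.get?_eq_none_iff_not_mem_keys]
        simp [hm]
      simp only [checkLoop, hnone]
      simp [hm]

lemma suff_q10 : ∀ cs : List Char, checkLoop "q10" cs = (decide (cs = ['a', 'm', 'b', 'a', 'h', 'a', 'n'])) := by
  intro cs
  cases cs with
  | nil => decide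
  | cons c cs =>
    by_cases ha : c = 'a'
    · subst ha
      have hstep : checkLoop "q10" ('a' :: cs) = checkLoop "q11" cs := rfl
      rw [hstep, suff_q11]
      simp
    · have hnone : objek_transitions.get? ("q10", c) = none := by
        rw [trans_eq, PySem.Dict.get?_eq_none_iff_not_mem_keys]
        simp [ha]
      simp only [checkLoop, hnone]
      simp [ha]

lemma suff_q3 : ∀ cs : List Char, checkLoop "q3" cs = (decide (cs = ['k', 'a', 'l', 'i', 'a', 'n']) || decide (cs = ['t', 'a', 'm', 'b', 'a', 'h', 'a', 'n'])) := by
  intro cs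
  cases cs with
  | nil => decide
  | cons c cs =>
    by_cases hk : c = 'k'
    · subst hk
      have hstep : checkLoop "q3" ('k' :: cs) = checkLoop "q4" cs := rfl
      rw [hstep, suff_q4]
      simp
    by_cases ht : c = 't'
    · subst ht
      have hstep : checkLoop "q3" ('t' :: cs) = checkLoop "q10" cs := rfl
      rw [hstep, suff_q10]
      simp
    · have hnone : objek_transitions.get? ("q3", c) = none := by
        rw [trans_eq, PySem.Dict.get?_eq_none_iff_not_mem_keys]
        simp [hk, ht]
      simp only [checkLoop, hnone]
      simp [hk, ht]

lemma suff_q20 : ∀ cs : List Char, checkLoop "q20" cs = (decide (cs = ['g', 'a', 'n'])) := by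
  intro cs
  cases cs with
  | nil => decide
  | cons c cs =>
    by_cases hg : c = 'g'
    · subst hg
      have hstep : checkLoop "q20" ('g' :: cs) = checkLoop "q7" cs := rfl
      rw [hstep, suff_q7]
      simp
    · have hnone : objek_transitions.get? ("q20", c) = none := by
        rw [trans_eq, PySem.Dict.get?_eq_none_iff_not_mem_keys]
        simp [hg]
      simp only [checkLoop, hnone]
      simp [hg]

lemma suff_q19 : ∀ cs : List Char, checkLoop "q19" cs = (decide (cs = ['n', 'g', 'a', 'n'])) := by
  intro cs
  cases cs with
  | nil => decide
  | cons c cs =>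
    by_cases hn : c = 'n'
    · subst hn
      have hstep : checkLoop "q19" ('n' :: cs) = checkLoop "q20" cs := rfl
      rw [hstep, suff_q20]
      simp
    · have hnone : objek_transitions.get? ("q19", c) = none := by
        rw [trans_eq, PySem.Dict.get?_eq_none_iff_not_mem_keys]
        simp [hn]
      simp only [checkLoop, hnone]
      simp [hn]

lemma suff_q18 : ∀ cs : List Char, checkLoop "q18" cs = (decide (cs = ['a', 'n', 'g', 'a', 'n'])) := by
  intro cs
  cases cs with
  | nil => decide
  | cons c cs =>
    by_cases ha : c = 'a'
    · subst ha
      have hstep : checkLoop "q18" ('a' :: cs) = checkLoop "q19" cs := rfl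
      rw [hstep, suff_q19]
      simp
    · have hnone : objek_transitions.get? ("q18", c) = none := by
        rw [trans_eq, PySem.Dict.get?_eq_none_iff_not_mem_keys]
        simp [ha]
      simp only [checkLoop, hnone]
      simp [ha]

lemma suff_q17 : ∀ cs : List Char, checkLoop "q17" cs = (decide (cs = ['r', 'a', 'n', 'g', 'a', 'n'])) := by
  intro cs
  cases cs with
  | nil => decide
  | cons c cs =>
    by_cases hr : c = 'r'
    · subst hr
      have hstep : checkLoop "q17" ('r' :: cs) = checkLoop "q18" cs := rfl
      rw [hstep, suff_q18]
      simp
    · have hnone : objek_transitions.get? ("q17", c) = none := by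
        rw [trans_eq, PySem.Dict.get?_eq_none_iff_not_mem_keys]
        simp [hr]
      simp only [checkLoop, hnone]
      simp [hr]

lemma suff_q16 : ∀ cs : List Char, checkLoop "q16" cs = (decide (cs = ['u', 'r', 'a', 'n', 'g', 'a', 'n'])) := by
  intro cs
  cases cs with
  | nil => decide
  | cons c cs =>
    by_cases hu : c = 'u'
    · subst hu
      have hstep : checkLoop "q16" ('u' :: cs) = checkLoop "q17" cs := rfl
      rw [hstep, suff_q17]
      simp
    · have hnone : objek_transitions.get? ("q16", c) = none := by
        rw [trans_eq, PySem.Dict.get?_eq_none_iff_not_mem_keys]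
        simp [hu]
      simp only [checkLoop, hnone]
      simp [hu]

lemma suff_q15 : ∀ cs : List Char, checkLoop "q15" cs = (decide (cs = ['g', 'u', 'r', 'a', 'n', 'g', 'a', 'n'])) := by
  intro cs
  cases cs with
  | nil => decide
  | cons c cs =>
    by_cases hg : c = 'g'
    · subst hg
      have hstep : checkLoop "q15" ('g' :: cs) = checkLoop "q16" cs := rfl
      rw [hstep, suff_q16]
      simp
    · have hnone : objek_transitions.get? ("q15", c) = none := by
        rw [trans_eq, PySem.Dict.get?_eq_none_iff_not_mem_keys]
        simp [hg]
      simp only [checkLoop, hnone]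
      simp [hg]

lemma suff_q2 : ∀ cs : List Char, checkLoop "q2" cs = (decide (cs = ['m', 'f', 'a', 'k', 't', 'o', 'r', 'a', 'n']) || decide (cs = ['m', 'b', 'a', 'g', 'i', 'a', 'n']) || decide (cs = ['r', 'k', 'a', 'l', 'i', 'a', 'n']) || decide (cs = ['r', 't', 'a', 'm', 'b', 'a', 'h', 'a', 'n']) || decide (cs = ['n', 'g', 'u', 'r', 'a', 'n', 'g', 'a', 'n'])) := by
  intro cs
  cases cs with
  | nil => decide
  | cons c cs =>
    by_cases hm : c = 'm'
    · subst hm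
      have hstep : checkLoop "q2" ('m' :: cs) = checkLoop "q21" cs := rfl
      rw [hstep, suff_q21]
      simp
    by_cases hr : c = 'r'
    · subst hr
      have hstep : checkLoop "q2" ('r' :: cs) = checkLoop "q3" cs := rfl
      rw [hstep, suff_q3]
      simp
    by_cases hn : c = 'n'
    · subst hn
      have hstep : checkLoop "q2" ('n' :: cs) = checkLoop "q15" cs := rfl
      rw [hstep, suff_q15]
      simp
    · have hnone : objek_transitions.get? ("q2", c) = none := by
        rw [trans_eq, PySem.Dict.get?_eq_none_iff_not_mem_keys]
        simp [hm, hr, hn]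
      simp only [checkLoop, hnone]
      simp [hm, hr, hn]

lemma suff_q1 : ∀ cs : List Char, checkLoop "q1" cs = (decide (cs = ['e', 'm', 'f', 'a', 'k', 't', 'o', 'r', 'a', 'n']) || decide (cs = ['e', 'm', 'b', 'a', 'g', 'i', 'a', 'n']) || decide (cs = ['e', 'r', 'k', 'a', 'l', 'i', 'a', 'n']) || decide (cs = ['e', 'r', 't', 'a', 'm', 'b', 'a', 'h', 'a', 'n']) || decide (cs = ['e', 'n', 'g', 'u', 'r', 'a', 'n', 'g', 'a', 'n'])) := by
  intro cs
  cases cs with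
  | nil => decide
  | cons c cs =>
    by_cases he : c = 'e'
    · subst he
      have hstep : checkLoop "q1" ('e' :: cs) = checkLoop "q2" cs := rfl
      rw [hstep, suff_q2]
      simp
    · have hnone : objek_transitions.get? ("q1", c) = none := by
        rw [trans_eq, PySem.Dict.get?_eq_none_iff_not_mem_keys]
        simp [he]
      simp only [checkLoop, hnone]
      simp [he]

lemma suff_q0 : ∀ cs : List Char, checkLoop "q0" cs = (decide (cs = ['p', 'e', 'm', 'f', 'a', 'k', 't', 'o', 'r', 'a', 'n']) || decide (cs = ['p', 'e', 'm', 'b', 'a', 'g', 'i', 'a', 'n']) || decide (cs = ['p', 'e', 'r', 'k', 'a', 'l', 'i', 'a', 'n']) || decide (cs = ['p', 'e', 'r', 't', 'a', 'm', 'b', 'a', 'h', 'a', 'n']) || decide (cs = ['p', 'e', 'n', 'g', 'u', 'r', 'a', 'n', 'g', 'a', 'n'])) := by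
  intro cs
  cases cs with
  | nil => decide
  | cons c cs =>
    by_cases hp : c = 'p'
    · subst hp
      have hstep : checkLoop "q0" ('p' :: cs) = checkLoop "q1" cs := rfl
      rw [hstep, suff_q1]
      simp
    · have hnone : objek_transitions.get? ("q0", c) = none := by
        rw [trans_eq, PySem.Dict.get?_eq_none_iff_not_mem_keys]
        simp [hp]
      simp only [checkLoop, hnone]
      simp [hp]

-- ===== VERDICT (by name: the statement is the Claim_ definition above) =====
theorem check_objek_spec : Claim_equal_check_objek := by
  intro s _
  unfold Spec_check_objek check_objek check_objek_alt objek_initial_states ACCEPTED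
  rw [suff_q0]
  simp only [PySem.Set.mem_ofList, List.mem_cons, List.not_mem_nil, or_false,
    Bool.decide_or, ← String.toList_inj]
  ac_rfl
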